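-- pv_equiv track=rewrite | github.com/ForFer/Hackerrank-and-learning-bits | crackingTheCodingInterview/makingAnagrams.py | number_needed
-- ===== SOURCE A (Python) =====
-- def number_needed(a, b):
--     d = dict()
--     for letter in a:
--         if letter in d:
--             d[letter] += 1
--         else:
--             d[letter] = 1
--     for letter in b:
--         if letter in d:
--             d[letter] -= 1
--         else:
--             d[letter] = -1
--
--     total_changes = 0
--     for k in d:
--         total_changes += abs(d[k])
--
--     return total_changes
-- ===== SOURCE B (Python) =====
-- def number_needed(a, b):
--     # Count how many characters can be KEPT (matched between a and b),
--     # then derive the deletions arithmetically.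
--     remaining = {}
--     for c in a:
--         remaining[c] = remaining.get(c, 0) + 1
--     matched = 0
--     for c in b:
--         if remaining.get(c, 0) > 0:
--             remaining[c] -= 1
--             matched += 1
--     return len(a) + len(b) - 2 * matched
-- ===== Notes on version B (the rewrite author's own statement) =====
-- stated objective: alternative
-- what changed: B maintains the count of matchable (kept) characters while scanning b against a's frequency map and closes with len(a)+len(b)-2*matched, instead of A's signed-difference dict over both strings summed with abs.
import Mathlib
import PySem

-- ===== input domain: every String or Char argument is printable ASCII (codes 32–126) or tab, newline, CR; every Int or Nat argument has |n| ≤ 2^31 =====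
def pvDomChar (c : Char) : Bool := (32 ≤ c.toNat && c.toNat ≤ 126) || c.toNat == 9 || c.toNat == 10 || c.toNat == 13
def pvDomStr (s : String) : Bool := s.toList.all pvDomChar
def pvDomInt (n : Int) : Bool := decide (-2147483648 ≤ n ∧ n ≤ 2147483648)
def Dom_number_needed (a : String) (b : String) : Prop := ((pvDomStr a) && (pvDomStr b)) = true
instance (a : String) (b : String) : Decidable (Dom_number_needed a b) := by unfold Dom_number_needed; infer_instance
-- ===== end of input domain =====

-- B counts the characters that can be KEPT (matched against a's frequency map) and closes with
-- len(a)+len(b)-2*matched, instead of A's signed-difference dict summed with abs; same cost, different decomposition.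


-- ===== PORT A =====
def number_needed (a : String) (b : String) : Int :=
  let d2 := b.toList.foldl
    (fun d c => if d.contains c then d.modify c 0 (· - 1) else d.insert c (-1))
    (a.toList.foldl
      (fun d c => if d.contains c then d.modify c 0 (· + 1) else d.insert c 1)
      PySem.Dict.empty)
  d2.keys.foldl (fun t k => t + |d2.getD k 0|) 0

-- ===== PORT B =====
-- the loop body of B's scan over b: match c if a positive count remains (d[c] -= 1 is read-then-insert;
-- the read is via getD, exact here since the guard ensures the key is present)
def bStep (st : PySem.Dict Char Int × Int) (c : Char) : PySem.Dict Char Int × Int :=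
  if st.1.getD c 0 > 0 then (st.1.insert c (st.1.getD c 0 - 1), st.2 + 1) else st

def number_needed_alt (a : String) (b : String) : Int :=
  let st := b.toList.foldl bStep
    (a.toList.foldl (fun d c => d.insert c (d.getD c 0 + 1)) PySem.Dict.empty, 0)
  (PySem.Str.len a : Int) + (PySem.Str.len b : Int) - 2 * st.2

-- ===== PRECONDITION & SPEC =====
def Spec_number_needed (a : String) (b : String) (out : Int) : Prop := out = number_needed_alt a b
instance (a : String) (b : String) (out : Int) : Decidable (Spec_number_needed a b out) := by unfold Spec_number_needed; infer_instance

-- ===== CLAIM (what is proved, stated in full; the proofs are below) =====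
def Claim_equal_number_needed : Prop := ∀ (a : String) (b : String), Dom_number_needed a b → Spec_number_needed a b (number_needed a b)

-- ===== LEMMAS AND PROOFS =====

-- a sum over a nodup list whose terms agree except at one member x
lemma sum_point {α : Type} [DecidableEq α] (g h : α → Int) :
    ∀ (cs : List α), cs.Nodup → ∀ x ∈ cs, (∀ c ∈ cs, c ≠ x → g c = h c) →
      (cs.map h).sum = (cs.map g).sum + (h x - g x) := by
  intro cs
  induction cs with
  | nil => intro _ x hx; simp at hx
  | cons y t ih =>
    intro hn x hx hgh
    have hyt : y ∉ t := (List.nodup_cons.mp hn).1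
    have hnt : t.Nodup := (List.nodup_cons.mp hn).2
    rcases List.mem_cons.mp hx with rfl | hxt
    · have : t.map h = t.map g := by
        apply List.map_congr_left
        intro c hc
        exact (hgh c (List.mem_cons_of_mem _ hc) (fun e => hyt (e ▸ hc))).symm
      simp [this]; ring
    · have hyx : y ≠ x := fun e => hyt (e ▸ hxt)
      have hy : g y = h y := hgh y (List.mem_cons_self ..) hyx
      have := ih hnt x hxt (fun c hc hcx => hgh c (List.mem_cons_of_mem _ hc) hcx)
      simp [this, hy]; ring

-- summing the multiplicities over a nodup superset of l's characters gives l's length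
lemma sum_count_eq_length (cs : List Char) (hn : cs.Nodup) :
    ∀ (l : List Char), (∀ x ∈ l, x ∈ cs) →
      (cs.map (fun c => (l.count c : Int))).sum = l.length := by
  intro l
  induction l with
  | nil => intro _; simp
  | cons x l ih =>
    intro hl
    have hx : x ∈ cs := hl x (List.mem_cons_self ..)
    have hrec := ih (fun y hy => hl y (List.mem_cons_of_mem _ hy))
    have := sum_point (g := fun c => (l.count c : Int))
      (h := fun c => ((x :: l).count c : Int)) cs hn x hx
      (by intro c _ hcx; simp [Ne.symm hcx])
    rw [this, hrec]
    simp

-- A's conditional update IS dict-counting (modify with default 0)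
lemma stepA_add (d : PySem.Dict Char Int) (c : Char) :
    (if d.contains c then d.modify c 0 (· + 1) else d.insert c 1) = d.modify c 0 (· + 1) := by
  cases h : d.contains c
  · rw [if_neg (by simp)]
    simp [PySem.Dict.modify, PySem.Dict.getD_of_not_contains _ _ h]
  · rw [if_pos (by simp)]

lemma stepA_sub (d : PySem.Dict Char Int) (c : Char) :
    (if d.contains c then d.modify c 0 (· - 1) else d.insert c (-1)) = d.modify c 0 (· - 1) := by
  cases h : d.contains c
  · rw [if_neg (by simp)]
    simp [PySem.Dict.modify, PySem.Dict.getD_of_not_contains _ _ h]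
  · rw [if_pos (by simp)]

-- a decrement loop over a dict subtracts the multiplicity
lemma getD_foldl_modify_sub_one (l : List Char) :
    ∀ (d : PySem.Dict Char Int) (v : Char),
      (l.foldl (fun d x => d.modify x 0 (· - 1)) d).getD v 0 = d.getD v 0 - l.count v := by
  induction l with
  | nil => intro d v; simp
  | cons x l ih =>
    intro d v
    simp only [List.foldl_cons]
    rw [ih]
    rw [PySem.Dict.getD_modify]
    by_cases h : v = x
    · subst h; simp; ring
    · simp [Ne.symm h, h]

-- B's matching scan: the matched counter collects, per character, min(remaining⁺, multiplicity in the rest of b)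
lemma matched_loop (cs : List Char) (hn : cs.Nodup) :
    ∀ (l : List Char), (∀ x ∈ l, x ∈ cs) → ∀ (f : PySem.Dict Char Int) (m : Int),
      (l.foldl bStep (f, m)).2 =
        m + (cs.map (fun c => min (max (f.getD c 0) 0) (l.count c : Int))).sum := by
  intro l
  induction l with
  | nil =>
    intro _ f m
    have : cs.map (fun c => min (max (f.getD c 0) 0) ((List.nil.count c : Nat) : Int))
        = cs.map (fun _ => (0 : Int)) := by
      apply List.map_congr_left
      intro c _
      simp
    simp only [List.foldl_nil, this]
    simp
  | cons x l ih =>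
    intro hl f m
    have hx : x ∈ cs := hl x (List.mem_cons_self ..)
    have hl' : ∀ y ∈ l, y ∈ cs := fun y hy => hl y (List.mem_cons_of_mem _ hy)
    simp only [List.foldl_cons, bStep]
    by_cases hv : f.getD x 0 > 0
    · rw [if_pos hv, ih hl' (f.insert x (f.getD x 0 - 1)) (m + 1)]
      have hpt := sum_point
        (g := fun c => min (max ((f.insert x (f.getD x 0 - 1)).getD c 0) 0) (l.count c : Int))
        (h := fun c => min (max (f.getD c 0) 0) (((x :: l).count c : Nat) : Int)) cs hn x hx
        (by
          intro c _ hcx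
          simp [PySem.Dict.getD_insert, hcx, Ne.symm hcx])
      rw [hpt]
      simp only [PySem.Dict.getD_insert, List.count_cons, BEq.rfl, if_true]
      push_cast
      omega
    · rw [if_neg hv, ih hl' f m]
      congr 1
      apply congrArg
      apply List.map_congr_left
      intro c _
      by_cases hcx : c = x
      · subst hcx
        have h0 : max (f.getD c 0) 0 = 0 := by omega
        have h1 : (0:Int) ≤ ((l.count c : Nat) : Int) + 1 := by positivity
        simp [h0, min_eq_left h1]
      · simp [Ne.symm hcx]

theorem number_needed_spec : Claim_equal_number_needed := by
  intro a b _
  unfold Spec_number_needed number_needed number_needed_alt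
  simp only []
  set la := a.toList with hla
  set lb := b.toList with hlb
  set cs : List Char := PySem.Set.ofList (la ++ lb) with hcs
  have hncs : cs.Nodup := PySem.Set.nodup_ofList _
  have hmemA : ∀ x ∈ la, x ∈ cs := by
    intro x hxl; rw [hcs]; exact (PySem.Set.mem_ofList ..).mpr (List.mem_append_left _ hxl)
  have hmemB : ∀ x ∈ lb, x ∈ cs := by
    intro x hxl; rw [hcs]; exact (PySem.Set.mem_ofList ..).mpr (List.mem_append_right _ hxl)
  -- A side: the two building loops are modify-loops
  have hfold1 : la.foldl (fun d c => if d.contains c then d.modify c 0 (· + 1) else d.insert c 1)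
      PySem.Dict.empty = PySem.Dict.counter la := by
    rw [PySem.Dict.counter_eq_foldl]
    exact PySem.List.foldl_congr_mem _ _ _ _ (by intro d c _; exact stepA_add d c)
  have hfold2 : ∀ d : PySem.Dict Char Int,
      lb.foldl (fun d c => if d.contains c then d.modify c 0 (· - 1) else d.insert c (-1)) d
        = lb.foldl (fun d c => d.modify c 0 (· - 1)) d := by
    intro d; exact PySem.List.foldl_congr_mem _ _ _ _ (by intro d c _; exact stepA_sub d c)
  rw [hfold1, hfold2]
  set d2 := lb.foldl (fun d c => d.modify c 0 (· - 1)) (PySem.Dict.counter la) with hd2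
  have hgetD : ∀ c, d2.getD c 0 = (la.count c : Int) - (lb.count c : Int) := by
    intro c
    rw [hd2, getD_foldl_modify_sub_one, PySem.Dict.getD_counter]
  have hkeys : d2.keys = cs := by
    rw [hd2, PySem.Dict.keys_foldl_modify, PySem.Dict.keys_counter, hcs,
      PySem.Set.ofList_append]
  -- A's total as a sum over cs
  rw [PySem.List.foldl_add (g := fun k => |d2.getD k 0|), hkeys]
  -- B side
  have hrem : la.foldl (fun d c => d.insert c (d.getD c 0 + 1)) PySem.Dict.empty
      = PySem.Dict.counter la := PySem.Dict.foldl_insert_getD_add_one_eq_counter la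
  rw [hrem, matched_loop cs hncs lb hmemB (PySem.Dict.counter la) 0]
  have hterm : cs.map (fun c => min (max ((PySem.Dict.counter la).getD c 0) 0) (lb.count c : Int))
      = cs.map (fun c => min (la.count c : Int) (lb.count c : Int)) := by
    apply List.map_congr_left
    intro c _
    rw [PySem.Dict.getD_counter]
    congr 1
    omega
  rw [hterm]
  -- close with the pointwise identity |x-y| = x + y - 2*min x y and the length sums
  have habs : cs.map (fun c => |d2.getD c 0|)
      = cs.map (fun c => ((la.count c : Int) + (lb.count c : Int))
          + (-2) * min (la.count c : Int) (lb.count c : Int)) := by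
    apply List.map_congr_left
    intro c _
    rw [hgetD c]
    rcases le_total ((la.count c : Nat) : Int) ((lb.count c : Nat) : Int) with h | h
    · rw [abs_of_nonpos (by omega), min_eq_left h]; ring
    · rw [abs_of_nonneg (by omega), min_eq_right h]; ring
  rw [habs]
  rw [PySem.List.sum_map_add_int
    (f := fun c => (la.count c : Int) + (lb.count c : Int))
    (g := fun c => (-2) * min (la.count c : Int) (lb.count c : Int))]
  rw [PySem.List.sum_map_add_int (f := fun c => (la.count c : Int))
    (g := fun c => (lb.count c : Int))]
  rw [List.sum_map_mul_left]
  rw [sum_count_eq_length cs hncs la hmemA, sum_count_eq_length cs hncs lb hmemB]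
  rw [PySem.Str.len_eq, PySem.Str.len_eq, ← hla, ← hlb]
  ring
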